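-- pv_equiv track=rewrite | github.com/Koushik0901/AI-Job-Hunter | src/dashboard/backend/resume_import.py | _parse_highlights
-- ===== SOURCE A (Python) =====
-- def _parse_highlights(lines: list[str]) -> list[str]:
--     bullets: list[str] = []
--     current = ""
--     for raw in lines:
--         line = raw.strip()
--         if not line:
--             continue
--         starts_new = not current or current.endswith((".", "!", "?"))
--         if starts_new and current:
--             bullets.append(current.strip())
--             current = line
--         elif starts_new and not current:
--             current = line
--         else:
--             current = f"{current} {line}".strip()
--     if current.strip():
--         bullets.append(current.strip())
--     return [item for item in bullets if item]
-- ===== SOURCE B (Python) =====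
-- _TERM = ".!?"
--
--
-- def _ends_sentence(s):
--     return s[-1] in _TERM
--
--
-- def _parse_highlights(lines: list[str]) -> list[str]:
--     items = [s for s in (l.strip() for l in lines) if s]
--     if not items:
--         return []
--     n = len(items)
--     ends = [i + 1 for i, s in enumerate(items) if _ends_sentence(s)]
--     if not ends or ends[-1] != n:
--         ends.append(n)
--     starts = [0] + ends[:-1]
--     return [" ".join(items[a:b]) for a, b in zip(starts, ends)]
-- ===== Notes on version B (the rewrite author's own statement) =====
-- stated objective: faster
-- what changed: B replaces A's single-pass buffer-and-flush loop by a staged, index-based algorithm: it cleans the lines, computes in one comprehension the list of bullet boundary positions (index after each sentence-terminating line, plus the end), and materialises each bullet by slicing items between consecutive boundaries and joining each slice once; no running buffer, flush state or trailing filter exists.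
import Mathlib
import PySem

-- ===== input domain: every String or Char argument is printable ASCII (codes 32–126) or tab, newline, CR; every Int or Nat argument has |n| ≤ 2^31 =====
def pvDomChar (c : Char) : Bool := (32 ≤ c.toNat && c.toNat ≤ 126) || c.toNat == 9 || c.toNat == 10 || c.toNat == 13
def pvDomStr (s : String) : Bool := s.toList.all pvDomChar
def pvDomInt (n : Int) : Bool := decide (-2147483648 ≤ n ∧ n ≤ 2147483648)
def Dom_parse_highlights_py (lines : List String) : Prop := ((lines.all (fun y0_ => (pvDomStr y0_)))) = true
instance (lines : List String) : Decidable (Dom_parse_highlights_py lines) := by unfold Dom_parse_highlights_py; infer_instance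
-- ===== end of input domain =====

-- B replaces A's buffer-and-flush loop by a staged algorithm: clean the lines, compute the list of
-- bullet boundary indices in one comprehension, then slice-and-join the items between consecutive boundaries.


-- ===== PORT A =====
-- A's loop body once the line is stripped and known nonempty (the Python branches, verbatim)
def stepA (st : List String × String) (line : String) : List String × String :=
  let bullets := st.1
  let current := st.2
  let starts_new := (current == "") || PySem.Str.endswith current "." ||
    PySem.Str.endswith current "!" || PySem.Str.endswith current "?"
  if starts_new && !(current == "") then (bullets ++ [PySem.Str.strip current], line)
  else if starts_new && (current == "") then (bullets, line)
  -- f"{current} {line}" is exactly " ".join([current, line])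
  else (bullets, PySem.Str.strip (PySem.Str.join " " [current, line]))

def parse_highlights_py (lines : List String) : List String :=
  let st := lines.foldl (fun (st : List String × String) raw =>
    let line := PySem.Str.strip raw
    if line == "" then st else stepA st line) ([], "")
  let bullets := if PySem.Str.strip st.2 == "" then st.1 else st.1 ++ [PySem.Str.strip st.2]
  bullets.filter (fun item => item != "")

-- ===== PORT B =====
-- B's helper _ends_sentence: s[-1] in ".!?".  B only calls it on nonempty strings, so the
-- none branch (Python's IndexError on "") is unreachable.
def termB (s : String) : Bool :=
  match PySem.Str.pyGet? s (-1) with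
  | some c => ".!?".toList.contains c
  | none => false

def parse_highlights_py_alt (lines : List String) : List String :=
  let items := (lines.map PySem.Str.strip).filter (fun s => s != "")
  if items.isEmpty then []
  else
    let n : Int := items.length
    let ends0 := ((PySem.List.enumerate items 0).filter (fun p => termB p.2)).map (fun p => p.1 + 1)
    let ends := if ends0 = [] ∨ ends0.getLast? ≠ some n then ends0 ++ [n] else ends0
    let starts := (0 : Int) :: PySem.List.slice ends none (some (-1))
    (starts.zip ends).map (fun p => PySem.Str.join " " (PySem.List.slice items (some p.1) (some p.2)))

-- ===== PRECONDITION & SPEC =====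
def Spec_parse_highlights_py (lines : List String) (out : List String) : Prop := out = parse_highlights_py_alt lines
instance (lines : List String) (out : List String) : Decidable (Spec_parse_highlights_py lines out) := by unfold Spec_parse_highlights_py; infer_instance

-- ===== CLAIM (what is proved, stated in full; the proofs are below) =====
def Claim_equal_parse_highlights_py : Prop := ∀ (lines : List String), Dom_parse_highlights_py lines → Spec_parse_highlights_py lines (parse_highlights_py lines)

-- ===== LEMMAS AND PROOFS =====

-- proof-side intermediate: the buffer-list fold (groups the cleaned items, one join per flush)
def stepB (st : List String × List String) (line : String) : List String × List String :=
  let bullets := st.1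
  let group := st.2
  let isTerm :=
    match PySem.Str.pyGet? (PySem.List.pyGetD group (-1) "") (-1) with
    | some c => ".!?".toList.contains c
    | none => false
  if !group.isEmpty && isTerm then (bullets ++ [PySem.Str.join " " group], [line])
  else (bullets, group ++ [line])

def bufB (items : List String) : List String :=
  let st := items.foldl stepB ([], [])
  if !st.2.isEmpty then st.1 ++ [PySem.Str.join " " st.2] else st.1

-- a nonempty string with non-space first and last characters (strip is the identity on these)
def Clean (cs : List Char) : Prop :=
  cs ≠ [] ∧ (∀ c, cs.head? = some c → PySem.Chars.isspace c = false) ∧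
    (∀ c, cs.getLast? = some c → PySem.Chars.isspace c = false)

-- the chars of " ".join(group)
def J (grp : List String) : List Char :=
  PySem.Chars.join [' '] (grp.map String.toList)

lemma head?_dropWhile_false (p : Char → Bool) (l : List Char) :
    ∀ c, (l.dropWhile p).head? = some c → p c = false := by
  induction l with
  | nil => intro c h; simp at h
  | cons a t ih =>
    intro c h
    rw [List.dropWhile_cons] at h
    by_cases hp : p a = true
    · exact ih c (by simpa [hp] using h)
    · simp [hp] at h
      subst h
      simpa using hp

lemma head?_of_prefix {l m : List Char} (h : l <+: m) (hne : l ≠ []) :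
    m.head? = l.head? := by
  obtain ⟨t, rfl⟩ := h
  exact List.head?_append_of_ne_nil l hne

lemma clean_strip (s : List Char) (h : PySem.Chars.strip s ≠ []) : Clean (PySem.Chars.strip s) := by
  have hstrip : PySem.Chars.strip s =
      (List.dropWhile PySem.Chars.isspace
        ((List.dropWhile PySem.Chars.isspace s).reverse)).reverse := by
    simp [PySem.Chars.strip, PySem.Chars.lstrip, PySem.Chars.rstrip]
  refine ⟨h, ?_, ?_⟩
  · -- head: strip s is a prefix of lstrip s, whose head is non-space
    intro c hc
    have hpre : PySem.Chars.strip s <+: List.dropWhile PySem.Chars.isspace s := by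
      rw [hstrip]
      have := List.dropWhile_suffix (l := (List.dropWhile PySem.Chars.isspace s).reverse)
        (p := PySem.Chars.isspace)
      exact List.reverse_suffix.mp (by simpa using this)
    have hhead : (List.dropWhile PySem.Chars.isspace s).head? = some c := by
      rw [head?_of_prefix hpre h]; exact hc
    exact head?_dropWhile_false _ _ _ hhead
  · intro c hc
    have : (PySem.Chars.strip s).reverse.head? = some c := by
      rw [List.head?_reverse]; exact hc
    rw [hstrip, List.reverse_reverse] at this
    exact head?_dropWhile_false _ _ _ this

lemma strip_clean {cs : List Char} (h : Clean cs) : PySem.Chars.strip cs = cs := by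
  obtain ⟨hne, hh, hl⟩ := h
  have hlstrip : PySem.Chars.lstrip cs = cs := by
    cases cs with
    | nil => rfl
    | cons a t =>
      have := hh a (by simp)
      simp [PySem.Chars.lstrip, this]
  have hrstrip : PySem.Chars.rstrip cs = cs := by
    obtain ⟨d, hd⟩ : ∃ d, cs.getLast? = some d := by
      cases hx : cs.getLast? with
      | none => exact absurd (List.getLast?_eq_none_iff.mp hx) hne
      | some d => exact ⟨d, rfl⟩
    have hdr : cs.reverse.head? = some d := by rw [List.head?_reverse]; exact hd
    have hsp := hl d hd
    cases hrev : cs.reverse with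
    | nil => simp [hrev] at hdr
    | cons a t =>
      have ha : a = d := by rw [hrev] at hdr; simpa using hdr
      rw [PySem.Chars.rstrip, hrev, List.dropWhile_cons, ha, hsp]
      simp only [Bool.false_eq_true, if_false, List.reverse_cons]
      rw [← List.reverse_reverse cs, hrev]
      simp [ha]
  rw [PySem.Chars.strip, hlstrip, hrstrip]

lemma clean_append {cs ds : List Char} (h1 : Clean cs) (h2 : Clean ds) :
    Clean (cs ++ ' ' :: ds) := by
  obtain ⟨hn1, hh1, hl1⟩ := h1
  obtain ⟨hn2, hh2, hl2⟩ := h2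
  refine ⟨by simp, ?_, ?_⟩
  · intro c hc
    rw [List.head?_append_of_ne_nil _ hn1] at hc
    exact hh1 c hc
  · intro c hc
    have hsplit : (' ' :: ds).getLast? = ([' '] ++ ds).getLast? := rfl
    rw [List.getLast?_append_of_ne_nil _ (l₂ := ' ' :: ds) (by simp), hsplit,
      List.getLast?_append_of_ne_nil _ hn2] at hc
    exact hl2 c hc

lemma join_snoc (gs : List (List Char)) (g : List Char) :
    PySem.Chars.join [' '] (gs ++ [g]) =
      if gs = [] then g else PySem.Chars.join [' '] gs ++ ' ' :: g := by
  induction gs with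
  | nil => simp [PySem.Chars.join_singleton]
  | cons a rest ih =>
    cases rest with
    | nil =>
      simp [PySem.Chars.join_cons_cons, PySem.Chars.join_singleton]
    | cons b rest' =>
      have h1 : (a :: b :: rest') ++ [g] = a :: ((b :: rest') ++ [g]) := by simp
      rw [h1]
      have h2 : (b :: rest') ++ [g] = b :: (rest' ++ [g]) := by simp
      rw [h2, PySem.Chars.join_cons_cons, ← h2, ih]
      simp [PySem.Chars.join_cons_cons]

lemma join_clean {gs : List (List Char)} (h : gs ≠ []) (hc : ∀ g ∈ gs, Clean g) :
    Clean (PySem.Chars.join [' '] gs) := by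
  induction gs with
  | nil => exact absurd rfl h
  | cons a rest ih =>
    cases rest with
    | nil =>
      rw [PySem.Chars.join_singleton]
      exact hc a (by simp)
    | cons b rest' =>
      rw [PySem.Chars.join_cons_cons]
      have hshape : a ++ [' '] ++ PySem.Chars.join [' '] (b :: rest') =
          a ++ ' ' :: PySem.Chars.join [' '] (b :: rest') := by simp
      rw [hshape]
      exact clean_append (hc a (by simp))
        (ih (by simp) (fun g hg => hc g (by simp [hg])))

lemma endswith_singleton (s : List Char) (c : Char) :
    PySem.Chars.endswith s [c] = true ↔ s.getLast? = some c := by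
  rw [PySem.Chars.endswith_iff]
  constructor
  · rintro ⟨t, rfl⟩
    rw [List.getLast?_append_of_ne_nil _ (by simp)]
    rfl
  · intro h
    obtain ⟨t, rfl⟩ := List.getLast?_eq_some_iff.mp h
    exact ⟨t, rfl⟩

lemma clean_J {grp : List String} (h : grp ≠ []) (hc : ∀ g ∈ grp, Clean g.toList) :
    Clean (J grp) := by
  unfold J
  exact join_clean (by simpa using h) (by
    intro g hg
    obtain ⟨x, hx, rfl⟩ := List.mem_map.mp hg
    exact hc x hx)

-- the last char of " ".join(group) is the last char of its last element
lemma getLast?_J {grp : List String} (h : grp ≠ []) (hg : (grp.getLast h).toList ≠ []) :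
    (J grp).getLast? = (grp.getLast h).toList.getLast? := by
  obtain ⟨gs, g, hcat⟩ := (List.eq_nil_or_concat grp).resolve_left h
  rw [List.concat_eq_append] at hcat
  subst hcat
  rw [List.getLast_concat]
  unfold J
  rw [List.map_append, List.map_singleton, join_snoc]
  rw [List.getLast_concat] at hg
  by_cases hgs : gs.map String.toList = []
  · simp [hgs]
  · rw [if_neg hgs]
    have hsplit : (' ' :: g.toList) = [' '] ++ g.toList := rfl
    rw [List.getLast?_append_of_ne_nil _ (l₂ := ' ' :: g.toList) (by simp), hsplit,
      List.getLast?_append_of_ne_nil _ hg]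

lemma cur_ne_empty {cur : String} {grp : List String} (h : grp ≠ [])
    (hJ : cur.toList = J grp) (hc : ∀ g ∈ grp, Clean g.toList) : cur ≠ "" := by
  intro hcur
  subst hcur
  exact (clean_J h hc).1 (by simpa using hJ.symm)

-- A's loop over the raw lines equals A's stripped-line body over the cleaned list
lemma foldA_bridge (lines : List String) (st : List String × String) :
    lines.foldl (fun (st : List String × String) raw =>
      let line := PySem.Str.strip raw
      if line == "" then st else stepA st line) st
    = ((lines.map PySem.Str.strip).filter (fun s => s != "")).foldl stepA st := by
  induction lines generalizing st with
  | nil => rfl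
  | cons raw rest ih =>
    rw [List.foldl_cons, List.map_cons, List.filter_cons]
    by_cases hr : PySem.Str.strip raw = ""
    · have hb : (PySem.Str.strip raw != "") = false := by simpa using hr
      rw [hb]
      simp only [Bool.false_eq_true, if_false]
      rw [← ih]
      congr 1
      simp [hr]
    · have hb : (PySem.Str.strip raw == "") = false := by simpa using hr
      rw [if_pos (show ((PySem.Str.strip raw != "") = true) by simpa using hr),
        List.foldl_cons, ih]
      congr 1
      simp only [hb, Bool.false_eq_true, if_false]

-- the loop invariant, propagated through both loops at once
set_option maxRecDepth 4096 in
lemma main_loop (items : List String) :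
    ∀ (bA bB : List String) (cur : String) (grp : List String),
      (∀ l ∈ items, l ≠ "" ∧ Clean l.toList) →
      bA = bB → cur.toList = J grp → (∀ g ∈ grp, Clean g.toList) → (∀ b ∈ bA, b ≠ "") →
      (items.foldl stepA (bA, cur)).1 = (items.foldl stepB (bB, grp)).1 ∧
      (items.foldl stepA (bA, cur)).2.toList = J (items.foldl stepB (bB, grp)).2 ∧
      (∀ g ∈ (items.foldl stepB (bB, grp)).2, Clean g.toList) ∧
      (∀ b ∈ (items.foldl stepA (bA, cur)).1, b ≠ "") := by
  induction items with
  | nil =>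
    intro bA bB cur grp _ hb hJ hg hne
    subst hb
    exact ⟨rfl, hJ, hg, hne⟩
  | cons line rest ih =>
    intro bA bB cur grp hitems hb hJ hg hne
    subst hb
    have hline := hitems line (by simp)
    rw [List.foldl_cons, List.foldl_cons]
    by_cases hgrp : grp = []
    · -- empty buffer: both just start a new group
      subst hgrp
      have hcur : cur = "" := by
        apply String.toList_inj.mp
        simpa [J, PySem.Chars.join_nil] using hJ
      subst hcur
      have hA : stepA (bA, "") line = (bA, line) := rfl
      have hB : stepB (bA, []) line = (bA, [line]) := rfl
      rw [hA, hB]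
      exact ih bA bA line [line] (fun l hl => hitems l (by simp [hl]))
        rfl (by simp [J, PySem.Chars.join_singleton]) (by simpa using hline.2) hne
    · -- nonempty buffer
      have hcur : cur ≠ "" := cur_ne_empty hgrp hJ hg
      have hcleanJ : Clean (J grp) := clean_J hgrp hg
      have hcleancur : Clean cur.toList := by rw [hJ]; exact hcleanJ
      have hglast : Clean (grp.getLast hgrp).toList := hg _ (List.getLast_mem hgrp)
      obtain ⟨d, hd⟩ : ∃ d, (grp.getLast hgrp).toList.getLast? = some d := by
        cases hx : (grp.getLast hgrp).toList.getLast? with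
        | none => exact absurd (List.getLast?_eq_none_iff.mp hx) hglast.1
        | some d => exact ⟨d, rfl⟩
      have hlastcur : cur.toList.getLast? = some d := by
        rw [hJ, getLast?_J hgrp hglast.1, hd]
      -- A's terminator test equals B's
      have hw : ∀ c : Char, PySem.Chars.endswith cur.toList [c] = (d == c) := by
        intro c
        by_cases hdc : d = c
        · subst hdc
          rw [(endswith_singleton cur.toList d).mpr hlastcur]
          simp
        · have hfalse : PySem.Chars.endswith cur.toList [c] = false := by
            rw [Bool.eq_false_iff]
            intro hcontra
            have hlc := (endswith_singleton cur.toList c).mp hcontra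
            rw [hlastcur] at hlc
            exact hdc (Option.some.inj hlc)
          rw [hfalse]
          simp [hdc]
      have hterm : ((cur == "") || PySem.Str.endswith cur "." ||
            PySem.Str.endswith cur "!" || PySem.Str.endswith cur "?")
          = (d == '.' || d == '!' || d == '?') := by
        have h1 : (cur == "") = false := by simpa using hcur
        rw [h1, PySem.Str.endswith_eq, PySem.Str.endswith_eq, PySem.Str.endswith_eq]
        rw [show ("." : String).toList = ['.'] from rfl,
          show ("!" : String).toList = ['!'] from rfl,
          show ("?" : String).toList = ['?'] from rfl, hw '.', hw '!', hw '?']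
        simp
      have hBterm : (match PySem.Str.pyGet? (PySem.List.pyGetD grp (-1) "") (-1) with
            | some c => (".!?".toList.contains c)
            | none => false)
          = (d == '.' || d == '!' || d == '?') := by
        rw [PySem.List.pyGetD_neg_one grp "" hgrp, PySem.Str.pyGet?_eq]
        have hget : PySem.Chars.pyGet? (grp.getLast hgrp).toList (-1)
            = (grp.getLast hgrp).toList.getLast? := by simp [pysem]
        rw [hget, hd]
        show (".!?".toList.contains d) = _
        rw [show (".!?".toList) = ['.', '!', '?'] from rfl]
        simp [Bool.or_assoc, Bool.beq_eq_decide_eq]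
      have hjoin : PySem.Str.join " " grp = cur := by
        apply String.toList_inj.mp
        rw [PySem.Str.toList_join, hJ]
        rfl
      by_cases hflag : (d == '.' || d == '!' || d == '?') = true
      · -- flush
        have hstrip : PySem.Str.strip cur = cur := by
          apply String.toList_inj.mp
          rw [PySem.Str.toList_strip]
          exact strip_clean hcleancur
        have hA : stepA (bA, cur) line = (bA ++ [cur], line) := by
          have h1 : (cur == "") = false := by simpa using hcur
          simp only [stepA]
          rw [hterm, hflag, h1]
          simp [hstrip]
        have hB : stepB (bA, grp) line = (bA ++ [PySem.Str.join " " grp], [line]) := by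
          simp only [stepB, hBterm, hflag]
          simp [hgrp]
        rw [hA, hB, hjoin]
        exact ih (bA ++ [cur]) (bA ++ [cur]) line [line]
          (fun l hl => hitems l (by simp [hl])) rfl
          (by simp [J, PySem.Chars.join_singleton]) (by simpa using hline.2)
          (by intro b hbm
              rcases List.mem_append.mp hbm with h | h
              · exact hne b h
              · simpa using (List.mem_singleton.mp h) ▸ hcur)
      · -- extend the buffer
        have hA : stepA (bA, cur) line
            = (bA, PySem.Str.strip (PySem.Str.join " " [cur, line])) := by
          have h1 : (cur == "") = false := by simpa using hcur
          have hflagf : (d == '.' || d == '!' || d == '?') = false := by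
            simpa using hflag
          simp only [stepA]
          rw [hterm, hflagf, h1]
          simp
        have hB : stepB (bA, grp) line = (bA, grp ++ [line]) := by
          simp only [stepB, hBterm]
          simp [hflag]
        rw [hA, hB]
        have hjoin2 : (PySem.Str.join " " [cur, line]).toList
            = cur.toList ++ ' ' :: line.toList := by
          rw [PySem.Str.toList_join]
          show PySem.Chars.join [' '] [cur.toList, line.toList] = _
          rw [PySem.Chars.join_cons_cons, PySem.Chars.join_singleton]
          simp
        have hcleannew : Clean (cur.toList ++ ' ' :: line.toList) :=
          clean_append hcleancur hline.2
        have hJnew : (PySem.Str.strip (PySem.Str.join " " [cur, line])).toList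
            = J (grp ++ [line]) := by
          rw [PySem.Str.toList_strip, hjoin2, strip_clean hcleannew, hJ]
          unfold J
          rw [List.map_append, List.map_singleton, join_snoc,
            if_neg (by simpa using hgrp)]
        exact ih bA bA _ (grp ++ [line]) (fun l hl => hitems l (by simp [hl])) rfl hJnew
          (by intro g hgm
              rcases List.mem_append.mp hgm with h | h
              · exact hg g h
              · exact (List.mem_singleton.mp h) ▸ hline.2)
          hne

-- A equals the buffer-list fold over the cleaned items
lemma A_eq_buf (lines : List String) :
    parse_highlights_py lines = bufB ((lines.map PySem.Str.strip).filter (fun s => s != "")) := by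
  unfold parse_highlights_py bufB
  rw [foldA_bridge]
  dsimp only
  set items := (lines.map PySem.Str.strip).filter (fun s => s != "") with hitems_def
  have hitems : ∀ l ∈ items, l ≠ "" ∧ Clean l.toList := by
    intro l hl
    rw [hitems_def, List.mem_filter] at hl
    obtain ⟨hmem, hne⟩ := hl
    obtain ⟨raw, _, rfl⟩ := List.mem_map.mp hmem
    have hne' : PySem.Str.strip raw ≠ "" := by simpa using hne
    refine ⟨hne', ?_⟩
    rw [PySem.Str.toList_strip]
    apply clean_strip
    intro hnil
    exact hne' (String.toList_inj.mp (by simpa [PySem.Str.toList_strip] using hnil))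
  obtain ⟨h1, h2, h3, h4⟩ := main_loop items [] [] "" []
    hitems rfl (by simp [J, PySem.Chars.join_nil]) (by simp) (by simp)
  set ra := items.foldl stepA ([], "") with hra
  set rb := items.foldl stepB ([], []) with hrb
  by_cases hgrp : rb.2 = []
  · have hcur : ra.2 = "" := by
      apply String.toList_inj.mp
      simp [h2, hgrp, J, PySem.Chars.join_nil]
    rw [hcur, hgrp]
    rw [show PySem.Str.strip "" = "" from rfl]
    simp only [show (("" : String) == "") = true from rfl, List.isEmpty_nil,
      Bool.not_true, Bool.false_eq_true, if_false]
    rw [h1]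
    exact List.filter_eq_self.mpr (fun b hb => by simpa using h4 b (h1 ▸ hb))
  · have hcur : ra.2 ≠ "" := cur_ne_empty hgrp h2 h3
    have hcleanJ : Clean (J rb.2) := clean_J hgrp h3
    have hstrip : PySem.Str.strip ra.2 = ra.2 := by
      apply String.toList_inj.mp
      rw [PySem.Str.toList_strip, h2]
      exact strip_clean hcleanJ
    have hjoin : PySem.Str.join " " rb.2 = ra.2 := by
      apply String.toList_inj.mp
      rw [PySem.Str.toList_join, h2]
      rfl
    rw [hstrip]
    have hcurb : (ra.2 == "") = false := by simpa using hcur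
    have hgrpb : rb.2.isEmpty = false := by simpa using hgrp
    rw [hcurb, hgrpb]
    simp only [Bool.false_eq_true, if_false, Bool.not_false]
    rw [hjoin, h1]
    refine List.filter_eq_self.mpr ?_
    intro b hbm
    rcases List.mem_append.mp hbm with h | h
    · simpa using h4 b (h1 ▸ h)
    · simpa using (List.mem_singleton.mp h) ▸ hcur

-- ---- the grouping seen as a structural recursion on the cleaned items ----

def termLast (g : List String) : Bool :=
  match g.getLast? with
  | some s => termB s
  | none => false

def grepA : List String → List String → List (List String)
  | g, [] => [g]
  | g, y :: xs => if termLast g then g :: grepA [y] xs else grepA (g ++ [y]) xs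

def groups : List String → List (List String)
  | [] => []
  | [x] => [[x]]
  | x :: y :: xs =>
    if termB x then [x] :: groups (y :: xs)
    else
      match groups (y :: xs) with
      | g :: gs => (x :: g) :: gs
      | [] => [[x]]

def mapFirst (f : List String → List String) : List (List String) → List (List String)
  | [] => []
  | h :: t => f h :: t

lemma stepB_cond {g : List String} (bull : List String) (y : String) (hg : g ≠ []) :
    stepB (bull, g) y =
      if termLast g then (bull ++ [PySem.Str.join " " g], [y]) else (bull, g ++ [y]) := by
  have hE : g.isEmpty = false := by simpa using hg
  have hT : (match PySem.Str.pyGet? (PySem.List.pyGetD g (-1) "") (-1) with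
      | some c => (".!?".toList.contains c)
      | none => false) = termLast g := by
    rw [PySem.List.pyGetD_neg_one g "" hg]
    unfold termLast
    rw [List.getLast?_eq_some_getLast hg]
    rfl
  simp only [stepB, hT, hE, Bool.not_false, Bool.true_and]

lemma termLast_append {z : List String} (g : List String) (hz : z ≠ []) :
    termLast (g ++ z) = termLast z := by
  unfold termLast
  rw [List.getLast?_append_of_ne_nil _ hz]

lemma fold_stepB_eq_grepA (t : List String) :
    ∀ (g bull : List String), g ≠ [] →
      (let st := t.foldl stepB (bull, g)
       if !st.2.isEmpty then st.1 ++ [PySem.Str.join " " st.2] else st.1)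
        = bull ++ (grepA g t).map (PySem.Str.join " ") := by
  induction t with
  | nil =>
    intro g bull hg
    have hE : g.isEmpty = false := by simpa using hg
    simp [grepA, hE]
  | cons y xs ih =>
    intro g bull hg
    rw [List.foldl_cons, stepB_cond bull y hg]
    by_cases ht : termLast g = true
    · rw [if_pos ht]
      have := ih [y] (bull ++ [PySem.Str.join " " g]) (by simp)
      simp only [this, grepA, ht, if_pos]
      simp
    · rw [if_neg ht]
      have := ih (g ++ [y]) bull (by simp)
      simp only [this, grepA, ht]
      simp

lemma grepA_append (xs : List String) :
    ∀ (z g : List String), z ≠ [] →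
      grepA (g ++ z) xs = mapFirst (fun h => g ++ h) (grepA z xs) := by
  induction xs with
  | nil => intro z g hz; simp [grepA, mapFirst]
  | cons y ys ih =>
    intro z g hz
    rw [grepA, grepA, termLast_append g hz]
    by_cases ht : termLast z = true
    · rw [if_pos ht, if_pos ht]
      rfl
    · rw [if_neg ht, if_neg ht, List.append_assoc]
      exact ih (z ++ [y]) g (by simp)

lemma grepA_eq_groups (t : List String) :
    ∀ h : String, grepA [h] t = groups (h :: t) := by
  induction t with
  | nil => intro h; simp [grepA, groups]
  | cons y ys ih =>
    intro h
    have hterm : termLast [h] = termB h := by simp [termLast]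
    rw [grepA, hterm]
    by_cases ht : termB h = true
    · rw [if_pos ht, ih y]
      simp [groups, ht]
    · rw [if_neg ht]
      have : grepA ([h] ++ [y]) ys = mapFirst (fun g => [h] ++ g) (grepA [y] ys) :=
        grepA_append ys [y] [h] (by simp)
      rw [show [h] ++ [y] = ([h] ++ [y] : List String) from rfl] at this
      rw [this, ih y]
      have hne : groups (y :: ys) ≠ [] := by
        cases ys with
        | nil => simp [groups]
        | cons z zs =>
          simp only [groups]
          split
          · simp
          · split <;> simp
      obtain ⟨g0, gs, hgg⟩ : ∃ g0 gs, groups (y :: ys) = g0 :: gs := by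
        cases hx : groups (y :: ys) with
        | nil => exact absurd hx hne
        | cons a b => exact ⟨a, b, rfl⟩
      rw [hgg]
      simp [groups, ht, hgg, mapFirst]

lemma buf_eq_groups (items : List String) :
    bufB items = (groups items).map (PySem.Str.join " ") := by
  cases items with
  | nil => rfl
  | cons h t =>
    unfold bufB
    rw [List.foldl_cons, show stepB ([], []) h = ([], [h]) from rfl]
    have := fold_stepB_eq_grepA t [h] [] (by simp)
    simp only [this, grepA_eq_groups t h, List.nil_append]

-- ---- the cut-index construction (B's algorithm) ----

def cutsFrom (s : Int) (items : List String) : List Int :=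
  ((PySem.List.enumerate items s).filter (fun p => termB p.2)).map (fun p => p.1 + 1)

def endsOf (items : List String) : List Int :=
  let c := cutsFrom 0 items
  if c = [] ∨ c.getLast? ≠ some (items.length : Int) then c ++ [(items.length : Int)] else c

def pairsFrom (a : Int) (es : List Int) : List (Int × Int) :=
  (a :: es.dropLast).zip es

lemma cutsFrom_cons (s : Int) (x : String) (xs : List String) :
    cutsFrom s (x :: xs) = (if termB x then [s + 1] else []) ++ cutsFrom (s + 1) xs := by
  unfold cutsFrom
  rw [PySem.List.enumerate_cons, List.filter_cons]
  by_cases ht : termB x = true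
  · simp [ht]
  · simp [ht]

lemma cutsFrom_shift (xs : List String) :
    ∀ s : Int, cutsFrom (s + 1) xs = (cutsFrom s xs).map (· + 1) := by
  induction xs with
  | nil => intro s; simp [cutsFrom, PySem.List.enumerate_nil]
  | cons x t ih =>
    intro s
    rw [cutsFrom_cons, cutsFrom_cons, ih (s + 1)]
    by_cases ht : termB x = true <;> simp [ht]

lemma endsOf_single (x : String) : endsOf [x] = [1] := by
  unfold endsOf cutsFrom
  rw [PySem.List.enumerate_cons, PySem.List.enumerate_nil, List.filter_cons]
  by_cases ht : termB x = true <;> simp [ht]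

lemma endsOf_cons (x : String) (xs : List String) (hxs : xs ≠ []) :
    endsOf (x :: xs) = (if termB x then [1] else []) ++ (endsOf xs).map (· + 1) := by
  have hc : cutsFrom 0 (x :: xs) = (if termB x then [1] else []) ++ (cutsFrom 0 xs).map (· + 1) := by
    rw [cutsFrom_cons, cutsFrom_shift xs 0]
    norm_num
  have hlen : ((x :: xs).length : Int) = (xs.length : Int) + 1 := by
    simp
  unfold endsOf
  rw [hc, hlen]
  cases hcc : cutsFrom 0 xs with
  | nil =>
    simp only [List.map_nil, List.append_nil]
    by_cases ht : termB x = true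
    · have hne1 : (1 : Int) ≠ (xs.length : Int) + 1 := by
        have : 1 ≤ xs.length := List.length_pos_iff.mpr hxs
        omega
      simp [ht, hne1]
    · simp [ht]
  | cons d ds =>
    have hmapne : ((d :: ds).map (· + (1:Int))) ≠ [] := by simp
    have hlast : ((if termB x then [(1:Int)] else []) ++ (d :: ds).map (· + 1)).getLast?
        = ((d :: ds).getLast? ).map (· + 1) := by
      rw [List.getLast?_append_of_ne_nil _ hmapne, List.getLast?_map]
    obtain ⟨e, he⟩ : ∃ e, (d :: ds).getLast? = some e := ⟨(d :: ds).getLast (by simp),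
      List.getLast?_eq_some_getLast (by simp)⟩
    have hiff : (e + 1 = (xs.length : Int) + 1) ↔ (e = (xs.length : Int)) := by omega
    by_cases hq : e = (xs.length : Int)
    · have hcond₂ : ¬(d :: ds = [] ∨ (d :: ds).getLast? ≠ some (xs.length : Int)) := by
        simp [he, hq]
      have hcond₁ : ¬((if termB x then [(1:Int)] else []) ++ (d :: ds).map (· + 1) = [] ∨
          ((if termB x then [(1:Int)] else []) ++ (d :: ds).map (· + 1)).getLast?
            ≠ some ((xs.length : Int) + 1)) := by
        rw [hlast, he]
        simp [hq]
      rw [if_neg hcond₁, if_neg hcond₂]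
    · have hcond₂ : (d :: ds = [] ∨ (d :: ds).getLast? ≠ some (xs.length : Int)) := by
        right; simp [he, hq]
      have hcond₁ : ((if termB x then [(1:Int)] else []) ++ (d :: ds).map (· + 1) = [] ∨
          ((if termB x then [(1:Int)] else []) ++ (d :: ds).map (· + 1)).getLast?
            ≠ some ((xs.length : Int) + 1)) := by
        right
        rw [hlast, he]
        simp only [Option.map_some, ne_eq, Option.some.injEq]
        omega
      rw [if_pos hcond₁, if_pos hcond₂, List.map_append]
      simp

lemma endsOf_pos {items : List String} (hit : items ≠ []) :
    ∀ e ∈ endsOf items, 1 ≤ e := by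
  intro e he
  have hcut : ∀ e' ∈ cutsFrom 0 items, 1 ≤ e' := by
    intro e' he'
    unfold cutsFrom at he'
    obtain ⟨p, hp, rfl⟩ := List.mem_map.mp he'
    have hpm := List.mem_filter.mp hp
    obtain ⟨k, hk, hpe⟩ := (PySem.List.mem_enumerate_iff _ _ _).mp hpm.1
    have : p.1 = (0 : Int) + k := by rw [hpe]
    omega
  have hn : (1 : Int) ≤ (items.length : Int) := by
    have : 1 ≤ items.length := List.length_pos_iff.mpr hit
    omega
  unfold endsOf at he
  by_cases hcond : (cutsFrom 0 items = [] ∨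
      (cutsFrom 0 items).getLast? ≠ some (items.length : Int))
  · rw [if_pos hcond] at he
    rcases List.mem_append.mp he with h | h
    · exact hcut e h
    · rw [List.mem_singleton.mp h]; exact hn
  · rw [if_neg hcond] at he
    exact hcut e he

lemma endsOf_ne_nil {items : List String} (_hit : items ≠ []) : endsOf items ≠ [] := by
  unfold endsOf
  by_cases hcond : (cutsFrom 0 items = [] ∨
      (cutsFrom 0 items).getLast? ≠ some (items.length : Int))
  · rw [if_pos hcond]; simp
  · rw [if_neg hcond]
    push_neg at hcond
    exact hcond.1

lemma pairsFrom_cons (a e : Int) (es : List Int) :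
    pairsFrom a (e :: es) = (a, e) :: pairsFrom e es := by
  cases es with
  | nil => simp [pairsFrom]
  | cons f fs => simp [pairsFrom]

lemma pairsFrom_shift (es : List Int) :
    ∀ a : Int, pairsFrom (a + 1) (es.map (· + 1))
      = (pairsFrom a es).map (fun p => (p.1 + 1, p.2 + 1)) := by
  induction es with
  | nil => intro a; simp [pairsFrom]
  | cons e t ih =>
    intro a
    rw [List.map_cons, pairsFrom_cons, pairsFrom_cons, ih e]
    simp

lemma pairsFrom_one (es : List Int) :
    pairsFrom 1 (es.map (· + 1)) = (pairsFrom 0 es).map (fun p => (p.1 + 1, p.2 + 1)) := by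
  simpa using pairsFrom_shift es 0

lemma pairsFrom_mem {a : Int} {es : List Int} {p : Int × Int} (hp : p ∈ pairsFrom a es) :
    (p.1 = a ∨ p.1 ∈ es) ∧ p.2 ∈ es := by
  unfold pairsFrom at hp
  obtain ⟨h1, h2⟩ := List.of_mem_zip hp
  refine ⟨?_, h2⟩
  rcases List.mem_cons.mp h1 with h | h
  · exact Or.inl h
  · exact Or.inr (List.mem_of_mem_dropLast h)

lemma slice_zero_succ (x : String) (xs : List String) {b : Int} (hb : 0 ≤ b) :
    PySem.List.slice (x :: xs) (some 0) (some (b + 1))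
      = x :: PySem.List.slice xs (some 0) (some b) := by
  rw [PySem.List.slice_toNat _ (le_refl 0) (by omega), PySem.List.slice_toNat _ (le_refl 0) hb]
  have h1 : (b + 1).toNat = b.toNat + 1 := by omega
  simp [h1, List.take_succ_cons]

lemma slice_succ_succ (x : String) (xs : List String) {a b : Int} (ha : 0 ≤ a) (hb : 0 ≤ b) :
    PySem.List.slice (x :: xs) (some (a + 1)) (some (b + 1))
      = PySem.List.slice xs (some a) (some b) := by
  rw [PySem.List.slice_toNat _ (by omega) (by omega), PySem.List.slice_toNat _ ha hb]
  have h1 : (b + 1).toNat = b.toNat + 1 := by omega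
  have h2 : (a + 1).toNat = a.toNat + 1 := by omega
  simp [h1, h2]

lemma join_cons_congr (x : String) {u v : List String} (hu : u ≠ []) (hv : v ≠ [])
    (h : PySem.Str.join " " u = PySem.Str.join " " v) :
    PySem.Str.join " " (x :: u) = PySem.Str.join " " (x :: v) := by
  apply String.toList_inj.mp
  obtain ⟨a, as, rfl⟩ : ∃ a as, u = a :: as := by
    cases u with
    | nil => exact absurd rfl hu
    | cons a as => exact ⟨a, as, rfl⟩
  obtain ⟨b, bs, rfl⟩ : ∃ b bs, v = b :: bs := by
    cases v with
    | nil => exact absurd rfl hv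
    | cons b bs => exact ⟨b, bs, rfl⟩
  have hlist := congrArg String.toList h
  rw [PySem.Str.toList_join, PySem.Str.toList_join] at hlist
  rw [PySem.Str.toList_join, PySem.Str.toList_join]
  simp only [List.map_cons] at hlist ⊢
  rw [PySem.Chars.join_cons_cons, PySem.Chars.join_cons_cons, hlist]

lemma take_toNat_ne_nil {e : Int} (he : 1 ≤ e) (y : String) (ys : List String) :
    PySem.List.slice (y :: ys) (some 0) (some e) ≠ [] := by
  rw [PySem.List.slice_toNat _ (le_refl 0) (by omega)]
  have : 1 ≤ e.toNat := by omega
  cases h : e.toNat with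
  | zero => omega
  | succ k => simp [List.take_succ_cons]

lemma groups_mem_ne_nil : ∀ (items : List String) (g : List String), g ∈ groups items → g ≠ [] := by
  intro items
  induction items using groups.induct with
  | case1 => intro g hg; simp [groups] at hg
  | case2 x => intro g hg; simp [groups] at hg; simp [hg]
  | case3 x y xs ht ih =>
    intro g hg
    rw [groups, if_pos ht] at hg
    rcases List.mem_cons.mp hg with h | h
    · simp [h]
    · exact ih g h
  | case4 x y xs ht g0 gs hgg ih =>
    intro g hg
    rw [groups, if_neg (by simpa using ht), hgg] at hg
    rcases List.mem_cons.mp hg with h | h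
    · simp [h]
    · exact ih g (hgg ▸ List.mem_cons_of_mem g0 h)
  | case5 x y xs ht hgg ih =>
    intro g hg
    rw [groups, if_neg (by simpa using ht), hgg] at hg
    simp at hg
    simp [hg]

lemma groups_ne_nil (y : String) (ys : List String) : groups (y :: ys) ≠ [] := by
  cases ys with
  | nil => simp [groups]
  | cons z zs =>
    simp only [groups]
    split
    · simp
    · split <;> simp

-- the heart of B: slicing between consecutive boundaries reproduces the grouping
lemma groups_eq_slices : ∀ (items : List String), items ≠ [] →
    (groups items).map (PySem.Str.join " ")
      = (pairsFrom 0 (endsOf items)).map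
          (fun p => PySem.Str.join " " (PySem.List.slice items (some p.1) (some p.2))) := by
  intro items
  induction items using groups.induct with
  | case1 => intro h; exact absurd rfl h
  | case2 x =>
    intro _
    rw [endsOf_single, groups]
    show _ = (pairsFrom 0 [1]).map _
    rw [pairsFrom_cons]
    show _ = ((0,1) :: pairsFrom 1 []).map _
    have : pairsFrom 1 ([] : List Int) = [] := by simp [pairsFrom]
    rw [this]
    have hsl : PySem.List.slice [x] (some (0:Int)) (some 1) = [x] := by
      rw [PySem.List.slice_toNat _ (by omega) (by omega)]
      rfl
    simp [hsl]
  | case3 x y xs ht ih =>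
    intro _
    rw [groups, if_pos ht, endsOf_cons x (y :: xs) (by simp), if_pos ht]
    rw [show ([(1:Int)] ++ (endsOf (y :: xs)).map (· + 1))
        = (1 : Int) :: (endsOf (y :: xs)).map (· + 1) from rfl,
      pairsFrom_cons, pairsFrom_one, List.map_cons, List.map_cons, List.map_map]
    have htail : ∀ p ∈ pairsFrom 0 (endsOf (y :: xs)),
        ((fun p => PySem.Str.join " " (PySem.List.slice (x :: y :: xs) (some p.1) (some p.2))) ∘
          (fun p => (p.1 + 1, p.2 + 1))) p
          = PySem.Str.join " " (PySem.List.slice (y :: xs) (some p.1) (some p.2)) := by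
      intro p hp
      obtain ⟨hp1, hp2⟩ := pairsFrom_mem hp
      have h2 : 1 ≤ p.2 := endsOf_pos (by simp) p.2 hp2
      have h1 : 0 ≤ p.1 := by
        rcases hp1 with h | h
        · omega
        · have := endsOf_pos (by simp : (y :: xs) ≠ []) p.1 h; omega
      show PySem.Str.join " " (PySem.List.slice (x :: y :: xs) (some (p.1 + 1)) (some (p.2 + 1))) = _
      rw [slice_succ_succ _ _ h1 (by omega)]
    congr 1
    rw [List.map_congr_left htail, ← ih (by simp)]
  | case4 x y xs ht g0 gs hgg ih =>
    intro _
    have htb : termB x = false := by simpa using ht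
    rw [groups, if_neg (by simp [htb]), hgg]
    rw [endsOf_cons x (y :: xs) (by simp), if_neg (by simp [htb]), List.nil_append]
    obtain ⟨e, es, hE⟩ : ∃ e es, endsOf (y :: xs) = e :: es := by
      cases hx : endsOf (y :: xs) with
      | nil => exact absurd hx (endsOf_ne_nil (by simp))
      | cons a b => exact ⟨a, b, rfl⟩
    have hepos : 1 ≤ e := endsOf_pos (items := y :: xs) (by simp) e (by rw [hE]; simp)
    have hIH := ih (by simp)
    rw [hgg, hE, pairsFrom_cons, List.map_cons, List.map_cons] at hIH
    have hh := (List.cons.injEq _ _ _ _).mp hIH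
    have hmc : (e :: es).map (· + (1:Int)) = (e + 1) :: es.map (· + 1) := rfl
    rw [hE, hmc, pairsFrom_cons, List.map_cons]
    congr 1
    · -- head bullet
      show PySem.Str.join " " (x :: g0)
          = PySem.Str.join " " (PySem.List.slice (x :: y :: xs) (some 0) (some (e + 1)))
      rw [slice_zero_succ _ _ (by omega)]
      have hg0 : g0 ≠ [] := groups_mem_ne_nil (y :: xs) g0 (by rw [hgg]; simp)
      have hsl : PySem.List.slice (y :: xs) (some 0) (some e) ≠ [] := take_toNat_ne_nil hepos y xs
      exact join_cons_congr x hg0 hsl hh.1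
    · -- remaining bullets
      rw [pairsFrom_shift, List.map_map]
      have htail : ∀ p ∈ pairsFrom e es,
          ((fun p => PySem.Str.join " " (PySem.List.slice (x :: y :: xs) (some p.1) (some p.2))) ∘
            (fun p => (p.1 + 1, p.2 + 1))) p
            = PySem.Str.join " " (PySem.List.slice (y :: xs) (some p.1) (some p.2)) := by
        intro p hp
        obtain ⟨hp1, hp2⟩ := pairsFrom_mem hp
        have h2 : 1 ≤ p.2 := endsOf_pos (by simp : (y :: xs) ≠ []) p.2 (by rw [hE]; simp [hp2])
        have h1 : 0 ≤ p.1 := by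
          rcases hp1 with h | h
          · omega
          · have := endsOf_pos (by simp : (y :: xs) ≠ []) p.1 (by rw [hE]; simp [h]); omega
        show PySem.Str.join " " (PySem.List.slice (x :: y :: xs) (some (p.1 + 1)) (some (p.2 + 1))) = _
        rw [slice_succ_succ _ _ h1 (by omega)]
      rw [List.map_congr_left htail]
      exact hh.2
  | case5 x y xs ht hgg ih =>
    exact absurd hgg (groups_ne_nil y xs)

-- B's body, with the cleaned items abstracted, equals the buffer fold
lemma alt_body (items : List String) :
    (if items.isEmpty then ([] : List String)
     else (((0 : Int) :: PySem.List.slice (endsOf items) none (some (-1))).zip (endsOf items)).map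
        (fun p => PySem.Str.join " " (PySem.List.slice items (some p.1) (some p.2))))
    = bufB items := by
  by_cases hit : items = []
  · subst hit
    rfl
  · have hE : items.isEmpty = false := by simpa using hit
    rw [hE]
    simp only [Bool.false_eq_true, if_false]
    rw [PySem.List.slice_to_neg_one, buf_eq_groups, groups_eq_slices items hit]
    rfl

-- ===== VERDICT (by name: the statement is the Claim_ definition above) =====
theorem parse_highlights_py_spec : Claim_equal_parse_highlights_py := by
  intro lines _
  show parse_highlights_py lines = parse_highlights_py_alt lines
  rw [A_eq_buf]
  exact (alt_body ((lines.map PySem.Str.strip).filter (fun s => s != ""))).symm
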